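-- pv_equiv track=rewrite | github.com/EricEngel/static-website-generator | src/main.py | remove_symbols_from_block
-- ===== SOURCE A (Python) =====
-- def remove_symbols_from_block(block):
--     new_block = ""
--     lines = block.split('\n')
--     for line in lines:
--         if line[:6] == "######":
--             line = line[6:].strip()
--         elif line[:5] == "#####":
--             line = line[5:].strip()
--         elif line[:4] == "####":
--             line = line[4:].strip()
--         elif line[:3] == "###":
--             line = line[3:].strip()
--         elif line[:2] == "##":
--             line = line[2:].strip()
--         elif line[:1] == "#":
--             line = line[1:].strip()
--         elif line[:1] == ">":
--             line = line[1:].strip()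
--         new_block += f"{line}\n"
--     return new_block
-- ===== SOURCE B (Python) =====
-- def remove_symbols_from_block(block):
--     # Single character-stream pass: build each line in a buffer; on flush, count
--     # leading markers and trim whitespace with explicit two-pointer scans.
--     # No split(), no prefix-slice cascade, no strip()/lstrip().
--     out = []
--     cur = []
--     for ch in block:
--         if ch == '\n':
--             out.append(_clean(cur))
--             out.append('\n')
--             cur = []
--         else:
--             cur.append(ch)
--     out.append(_clean(cur))
--     out.append('\n')
--     return ''.join(out)
--
--
-- def _clean(cs):
--     m = len(cs)
--     k = 0
--     while k < m and k < 6 and cs[k] == '#':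
--         k += 1
--     if k == 0 and m > 0 and cs[0] == '>':
--         k = 1
--     if k == 0:
--         return ''.join(cs)
--     lo, hi = k, m
--     while lo < hi and cs[lo].isspace():
--         lo += 1
--     while lo < hi and cs[hi - 1].isspace():
--         hi -= 1
--     return ''.join(cs[lo:hi])
-- ===== Notes on version B (the rewrite author's own statement) =====
-- stated objective: alternative
-- what changed: Replaces splitting into lines plus a seven-branch descending prefix-slice cascade plus strip() by a single character-stream pass that buffers each line and, on flush, counts leading markers with an index loop and trims whitespace with explicit two-pointer scans.
import Mathlib
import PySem

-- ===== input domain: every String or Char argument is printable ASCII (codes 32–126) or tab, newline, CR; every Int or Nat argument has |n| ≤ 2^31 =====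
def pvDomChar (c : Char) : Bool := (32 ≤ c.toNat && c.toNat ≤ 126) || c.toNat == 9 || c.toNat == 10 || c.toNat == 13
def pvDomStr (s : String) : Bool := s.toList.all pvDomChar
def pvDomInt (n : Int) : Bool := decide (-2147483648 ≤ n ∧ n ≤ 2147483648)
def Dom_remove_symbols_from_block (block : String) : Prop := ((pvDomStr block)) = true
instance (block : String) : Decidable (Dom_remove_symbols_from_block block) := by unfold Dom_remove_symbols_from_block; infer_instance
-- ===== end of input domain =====

-- B replaces A's split('\n') + seven-branch descending prefix-slice cascade + strip() by a single
-- character-stream pass buffering each line, with an index loop counting the markers and explicit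
-- two-pointer whitespace trimming; objective: alternative (same asymptotic cost).

-- ===== PORT A =====
-- one line of A's loop body: the descending cascade of prefix tests (line[:k] / line[k:] as slices)
def pvSymLine (l : List Char) : List Char :=
  if PySem.List.slice l none (some 6) = "######".toList then PySem.Chars.strip (PySem.List.slice l (some 6) none)
  else if PySem.List.slice l none (some 5) = "#####".toList then PySem.Chars.strip (PySem.List.slice l (some 5) none)
  else if PySem.List.slice l none (some 4) = "####".toList then PySem.Chars.strip (PySem.List.slice l (some 4) none)
  else if PySem.List.slice l none (some 3) = "###".toList then PySem.Chars.strip (PySem.List.slice l (some 3) none)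
  else if PySem.List.slice l none (some 2) = "##".toList then PySem.Chars.strip (PySem.List.slice l (some 2) none)
  else if PySem.List.slice l none (some 1) = "#".toList then PySem.Chars.strip (PySem.List.slice l (some 1) none)
  else if PySem.List.slice l none (some 1) = ">".toList then PySem.Chars.strip (PySem.List.slice l (some 1) none)
  else l

def remove_symbols_from_block (block : String) : String :=
  String.mk ((PySem.Chars.splitOn block.toList ['\n']).foldl
    (fun acc line => acc ++ pvSymLine line ++ ['\n']) [])

-- ===== PORT B =====
-- while k < m and k < 6 and cs[k] == '#': k += 1   (cs[k] is guarded by k < m, so getD is exact)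
def altHash (cs : List Char) (k : Nat) : Nat :=
  if h : k < cs.length ∧ k < 6 ∧ cs.getD k ' ' = '#' then altHash cs (k+1) else k
  termination_by 6 - k
  decreasing_by omega

-- while lo < hi and cs[lo].isspace(): lo += 1
def altLo (cs : List Char) (hi lo : Nat) : Nat :=
  if h : lo < hi ∧ PySem.Chars.isspace (cs.getD lo ' ') = true then altLo cs hi (lo+1) else lo
  termination_by hi - lo
  decreasing_by omega

-- while lo < hi and cs[hi-1].isspace(): hi -= 1
def altHi (cs : List Char) (lo hi : Nat) : Nat :=
  if h : lo < hi ∧ PySem.Chars.isspace (cs.getD (hi-1) ' ') = true then altHi cs lo (hi-1) else hi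
  termination_by hi
  decreasing_by omega

-- _clean(cs): count up to six '#' (or one leading '>'), then two-pointer trim cs[lo:hi]
def altClean (cs : List Char) : List Char :=
  let m := cs.length
  let k0 := altHash cs 0
  let k := if k0 = 0 ∧ 0 < m ∧ cs.getD 0 ' ' = '>' then 1 else k0
  if k = 0 then cs
  else
    let lo := altLo cs m k
    let hi := altHi cs lo m
    PySem.List.slice cs (some (lo : Int)) (some (hi : Int))

-- the for-ch loop body: flush the buffer on '\n', else extend it
def altStep (st : List (List Char) × List Char) (c : Char) : List (List Char) × List Char :=
  if c = '\n' then (st.1 ++ [altClean st.2, ['\n']], []) else (st.1, st.2 ++ [c])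

def remove_symbols_from_block_alt (block : String) : String :=
  let st := block.toList.foldl altStep ([], [])
  String.mk ((st.1 ++ [altClean st.2, ['\n']]).flatten)   -- ''.join(out)

-- ===== PRECONDITION & SPEC =====
def Spec_remove_symbols_from_block (block : String) (out : String) : Prop := out = remove_symbols_from_block_alt block
instance (block : String) (out : String) : Decidable (Spec_remove_symbols_from_block block out) := by unfold Spec_remove_symbols_from_block; infer_instance

-- ===== CLAIM (what is proved, stated in full; the proofs are below) =====
def Claim_equal_remove_symbols_from_block : Prop := ∀ (block : String), Dom_remove_symbols_from_block block → Spec_remove_symbols_from_block block (remove_symbols_from_block block)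

-- ===== LEMMAS AND PROOFS =====

-- reference single-char split used to relate both drivers
def splitSpecAux (cur : List Char) : List Char → List (List Char)
  | [] => [cur]
  | c :: rest => if c = '\n' then cur :: splitSpecAux [] rest else splitSpecAux (cur ++ [c]) rest

theorem pv_go_spec : ∀ (fuel : Nat) (l cur : List Char) (acc : List (List Char)), l.length ≤ fuel →
    PySem.Chars.splitOn.go ['\n'] fuel l cur acc = acc.reverse ++ splitSpecAux cur.reverse l := by
  intro fuel
  induction fuel with
  | zero =>
      intro l cur acc h
      have : l = [] := by cases l <;> simp_all
      subst this
      simp [PySem.Chars.splitOn.go, splitSpecAux]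
  | succ fuel ih =>
      intro l cur acc h
      cases l with
      | nil => simp [PySem.Chars.splitOn.go, splitSpecAux]
      | cons c rest =>
          by_cases hc : c = '\n'
          · subst hc
            rw [show PySem.Chars.splitOn.go ['\n'] (fuel+1) ('\n'::rest) cur acc
                  = PySem.Chars.splitOn.go ['\n'] fuel rest [] (cur.reverse :: acc) from by
              simp [PySem.Chars.splitOn.go, List.isPrefixOf]]
            rw [ih rest [] (cur.reverse :: acc) (by simpa using Nat.le_of_succ_le_succ h)]
            simp [splitSpecAux]
          · have hb : ('\n' == c) = false := by rw [beq_eq_false_iff_ne]; exact fun h => hc h.symm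
            rw [show PySem.Chars.splitOn.go ['\n'] (fuel+1) (c::rest) cur acc
                  = PySem.Chars.splitOn.go ['\n'] fuel rest (c :: cur) acc from by
              simp [PySem.Chars.splitOn.go, List.isPrefixOf, hb]]
            rw [ih rest (c :: cur) acc (by simpa using Nat.le_of_succ_le_succ h)]
            simp [splitSpecAux, hc]

theorem pv_splitOn_eq (l : List Char) :
    PySem.Chars.splitOn l ['\n'] = splitSpecAux [] l := by
  unfold PySem.Chars.splitOn
  rw [pv_go_spec (l.length + 1) l [] [] (by omega)]
  simp

-- B's driver fold, flattened, is the flatMap of altClean over the reference split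
theorem pv_altFold (l : List Char) : ∀ (out : List (List Char)) (cur : List Char),
    ((l.foldl altStep (out, cur)).1 ++ [altClean (l.foldl altStep (out, cur)).2, ['\n']]).flatten
      = out.flatten ++ (splitSpecAux cur l).flatMap (fun line => altClean line ++ ['\n']) := by
  induction l with
  | nil => intro out cur; simp [splitSpecAux]
  | cons c rest ih =>
      intro out cur
      by_cases hc : c = '\n'
      · subst hc
        simp only [List.foldl_cons, altStep, if_pos rfl]
        rw [ih]
        simp [splitSpecAux]
      · simp only [List.foldl_cons, altStep, if_neg hc]
        rw [ih]
        simp [splitSpecAux, hc]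

-- characterisations of the three index loops
theorem pv_altHash_spec (cs : List Char) : ∀ k, k ≤ 6 →
    altHash cs k = min 6 (k + ((cs.drop k).takeWhile (· = '#')).length) := by
  have main : ∀ d k, k ≤ 6 → 6 - k = d →
      altHash cs k = min 6 (k + ((cs.drop k).takeWhile (· = '#')).length) := by
    intro d
    induction d with
    | zero =>
        intro k hk hd
        have hk6 : k = 6 := by omega
        subst hk6
        rw [altHash]
        simp
    | succ d ih =>
        intro k hk hd
        rw [altHash]
        by_cases hcond : k < cs.length ∧ k < 6 ∧ cs.getD k ' ' = '#'
        · rw [dif_pos hcond]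
          obtain ⟨hlen, hk6, hch⟩ := hcond
          rw [ih (k+1) (by omega) (by omega)]
          have hdk : cs.drop k = cs[k] :: cs.drop (k+1) := List.drop_eq_getElem_cons hlen
          have hget : cs[k] = '#' := by
            have := List.getD_eq_getElem cs ' ' hlen
            rw [← this]; exact hch
          rw [hdk]
          simp only [List.takeWhile_cons, hget, decide_true, if_pos, List.length_cons]
          congr 1
          omega
        · rw [dif_neg hcond]
          have hz : ((cs.drop k).takeWhile (· = '#')).length = 0 := by
            by_cases hlen : k < cs.length
            · have hdk : cs.drop k = cs[k] :: cs.drop (k+1) := List.drop_eq_getElem_cons hlen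
              have hch : ¬ cs[k] = '#' := by
                intro hcc
                exact hcond ⟨hlen, by omega, by rw [List.getD_eq_getElem cs ' ' hlen]; exact hcc⟩
              rw [hdk]
              simp [List.takeWhile_cons, hch]
            · rw [List.drop_eq_nil_of_le (by omega)]
              rfl
          rw [hz]
          omega
  intro k hk
  exact main (6 - k) k hk rfl

theorem pv_altLo_spec (cs : List Char) : ∀ k,
    altLo cs cs.length k = k + ((cs.drop k).takeWhile PySem.Chars.isspace).length := by
  have main : ∀ d k, cs.length - k ≤ d →
      altLo cs cs.length k = k + ((cs.drop k).takeWhile PySem.Chars.isspace).length := by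
    intro d
    induction d with
    | zero =>
        intro k hd
        have hk : cs.length ≤ k := by omega
        rw [altLo]
        rw [dif_neg (by omega)]
        rw [List.drop_eq_nil_of_le hk]
        rfl
    | succ d ih =>
        intro k hd
        by_cases hlen : k < cs.length
        · have hdk : cs.drop k = cs[k] :: cs.drop (k+1) := List.drop_eq_getElem_cons hlen
          have hget : cs.getD k ' ' = cs[k] := List.getD_eq_getElem cs ' ' hlen
          by_cases hsp : PySem.Chars.isspace cs[k] = true
          · rw [altLo, dif_pos ⟨hlen, by rw [hget]; exact hsp⟩]
            rw [ih (k+1) (by omega)]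
            rw [hdk]
            simp only [List.takeWhile_cons, hsp, if_pos, List.length_cons]
            omega
          · rw [altLo, dif_neg (by rw [hget]; exact fun hx => hsp hx.2)]
            rw [hdk]
            simp [List.takeWhile_cons, hsp]
        · rw [altLo, dif_neg (by omega)]
          rw [List.drop_eq_nil_of_le (by omega)]
          rfl
  intro k
  exact main cs.length k (by omega)

theorem pv_altHi_spec (cs : List Char) : ∀ hi lo, lo ≤ hi → hi ≤ cs.length →
    altHi cs lo hi = max lo (hi - ((cs.take hi).reverse.takeWhile PySem.Chars.isspace).length) := by
  intro hi
  induction hi with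
  | zero =>
      intro lo hlo _
      rw [altHi, dif_neg (by omega)]
      omega
  | succ hi ih =>
      intro lo hlo hhi
      have hlt : hi < cs.length := by omega
      have htk : (cs.take (hi+1)).reverse = cs[hi] :: (cs.take hi).reverse := by
        rw [List.take_succ_eq_append_getElem hlt]
        simp
      have hgd : cs.getD (hi + 1 - 1) ' ' = cs[hi] := by
        show cs.getD hi ' ' = cs[hi]
        exact List.getD_eq_getElem cs ' ' hlt
      by_cases hlo2 : lo < hi + 1
      · by_cases hsp : PySem.Chars.isspace cs[hi] = true
        · rw [altHi, dif_pos ⟨hlo2, by rw [hgd]; exact hsp⟩]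
          simp only [Nat.add_sub_cancel]
          rw [ih lo (by omega) (by omega)]
          rw [htk]
          simp only [List.takeWhile_cons, hsp, if_pos, List.length_cons]
          omega
        · have hsp' : PySem.Chars.isspace cs[hi] = false := by
            revert hsp; cases (PySem.Chars.isspace cs[hi]) <;> simp
          rw [altHi, dif_neg (by rw [hgd]; exact fun hx => hsp hx.2)]
          rw [htk]
          simp only [List.takeWhile_cons, hsp', Bool.false_eq_true, if_false, List.length_nil]
          omega
      · rw [altHi, dif_neg (by omega)]
        omega

theorem pv_dropWhile_eq_drop (p : Char → Bool) (l : List Char) :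
    l.dropWhile p = l.drop (l.takeWhile p).length := by
  induction l with
  | nil => rfl
  | cons a t ih => by_cases h : p a <;> simp [List.dropWhile, List.takeWhile, h, ih]

-- the two-pointer trim equals Python's strip of the suffix
theorem pv_trim_eq (cs : List Char) (k : Nat) (hk : k ≤ cs.length) :
    PySem.List.slice cs (some ((altLo cs cs.length k : Nat) : Int))
        (some ((altHi cs (altLo cs cs.length k) cs.length : Nat) : Int))
      = PySem.Chars.strip (cs.drop k) := by
  have hm : ((cs.drop k).takeWhile PySem.Chars.isspace).length ≤ cs.length - k := by
    have h1 : ((cs.drop k).takeWhile PySem.Chars.isspace).length ≤ (cs.drop k).length :=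
      (List.takeWhile_sublist _).length_le
    simpa using h1
  set lo := altLo cs cs.length k with hlo_def
  have hlo : lo = k + ((cs.drop k).takeWhile PySem.Chars.isspace).length := pv_altLo_spec cs k
  have hlo_le : lo ≤ cs.length := by omega
  have hdrop : cs.drop lo = (cs.drop k).dropWhile PySem.Chars.isspace := by
    rw [pv_dropWhile_eq_drop, List.drop_drop, hlo]
  rw [PySem.List.slice_natCast]
  rw [PySem.Chars.strip]
  have hls : PySem.Chars.lstrip (cs.drop k) = cs.drop lo := by
    rw [PySem.Chars.lstrip, hdrop]
  rw [hls]
  by_cases hend : lo = cs.length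
  · have h1 : cs.drop lo = [] := by rw [hend]; simp
    rw [h1]
    simp [PySem.Chars.rstrip]
  · have hlo_lt : lo < cs.length := by omega
    have hcons : cs.drop lo = cs[lo] :: cs.drop (lo+1) := List.drop_eq_getElem_cons hlo_lt
    have hns : PySem.Chars.isspace cs[lo] = false := by
      have hne : cs.drop lo ≠ [] := by rw [hcons]; exact List.cons_ne_nil _ _
      have hne2 : (cs.drop k).dropWhile PySem.Chars.isspace ≠ [] := by rw [← hdrop]; exact hne
      have hh := List.head_dropWhile_not (p := PySem.Chars.isspace) (l := cs.drop k) hne2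
      simp only [← hdrop] at hh
      rw [List.head_drop] at hh
      simpa using hh
    -- trailing-space count of cs equals that of cs.drop lo
    have hrevsplit : cs.reverse = (cs.drop lo).reverse ++ (cs.take lo).reverse := by
      rw [← List.reverse_append, List.take_append_drop]
    have hwne : (((cs.drop lo).reverse.takeWhile PySem.Chars.isspace)).length ≠ (cs.drop lo).reverse.length := by
      intro hEq
      have hEq2 : (cs.drop lo).reverse.takeWhile PySem.Chars.isspace = (cs.drop lo).reverse :=
        (List.takeWhile_sublist _).eq_of_length hEq
      have hall := List.takeWhile_eq_self_iff.mp hEq2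
      have hmem : cs[lo] ∈ (cs.drop lo).reverse := by
        rw [List.mem_reverse, hcons]; exact List.mem_cons_self
      have := hall _ hmem
      rw [hns] at this
      exact Bool.false_ne_true this
    have hW : cs.reverse.takeWhile PySem.Chars.isspace = (cs.drop lo).reverse.takeWhile PySem.Chars.isspace := by
      rw [hrevsplit, List.takeWhile_append, if_neg hwne]
    set w := ((cs.drop lo).reverse.takeWhile PySem.Chars.isspace).length with hw_def
    have hw_lt : w < cs.length - lo := by
      have h1 : w ≤ (cs.drop lo).reverse.length := (List.takeWhile_sublist _).length_le
      have h2 : w ≠ (cs.drop lo).reverse.length := hwne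
      have h3 : (cs.drop lo).reverse.length = cs.length - lo := by simp
      omega
    have hhi : altHi cs lo cs.length = cs.length - w := by
      rw [pv_altHi_spec cs cs.length lo hlo_le (by omega)]
      rw [List.take_length, hW, ← hw_def]
      omega
    rw [hhi]
    -- rstrip (cs.drop lo) = (cs.drop lo).take ((cs.length - lo) - w)
    rw [PySem.Chars.rstrip, pv_dropWhile_eq_drop, ← hw_def]
    rw [List.reverse_drop]
    simp only [List.reverse_reverse, List.length_reverse, List.length_drop]
    congr 1
    omega

theorem pv_take_replicate_iff (l : List Char) (k : Nat) :
    l.take k = List.replicate k '#' ↔ k ≤ (l.takeWhile (· = '#')).length := by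
  induction k generalizing l with
  | zero => simp
  | succ k ih =>
      cases l with
      | nil =>
          simp only [List.take_nil, List.takeWhile_nil, List.length_nil]
          constructor
          · intro h; exact absurd h (by simp [List.replicate_succ])
          · omega
      | cons a t =>
          by_cases ha : a = '#'
          · subst ha
            simp [List.replicate_succ, ih]
          · simp [List.replicate_succ, ha]

-- per line: A's cascade equals B's count-and-trim
theorem pv_line_eq (cs : List Char) : pvSymLine cs = altClean cs := by
  have ht_le : (cs.takeWhile (· = '#')).length ≤ cs.length := (List.takeWhile_sublist _).length_le
  set t := (cs.takeWhile (· = '#')).length with htd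
  have hc : ∀ k : Nat, cs.take k = List.replicate k '#' ↔ k ≤ t := fun k => pv_take_replicate_iff cs k
  have h6 : (PySem.List.slice cs none (some 6) = "######".toList) ↔ 6 ≤ t := by
    rw [show ((6:Int)) = ((6:Nat):Int) by norm_num, PySem.List.slice_to_natCast]
    simpa using hc 6
  have h5 : (PySem.List.slice cs none (some 5) = "#####".toList) ↔ 5 ≤ t := by
    rw [show ((5:Int)) = ((5:Nat):Int) by norm_num, PySem.List.slice_to_natCast]
    simpa using hc 5
  have h4 : (PySem.List.slice cs none (some 4) = "####".toList) ↔ 4 ≤ t := by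
    rw [show ((4:Int)) = ((4:Nat):Int) by norm_num, PySem.List.slice_to_natCast]
    simpa using hc 4
  have h3 : (PySem.List.slice cs none (some 3) = "###".toList) ↔ 3 ≤ t := by
    rw [show ((3:Int)) = ((3:Nat):Int) by norm_num, PySem.List.slice_to_natCast]
    simpa using hc 3
  have h2 : (PySem.List.slice cs none (some 2) = "##".toList) ↔ 2 ≤ t := by
    rw [show ((2:Int)) = ((2:Nat):Int) by norm_num, PySem.List.slice_to_natCast]
    simpa using hc 2
  have h1 : (PySem.List.slice cs none (some 1) = "#".toList) ↔ 1 ≤ t := by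
    rw [show ((1:Int)) = ((1:Nat):Int) by norm_num, PySem.List.slice_to_natCast]
    simpa using hc 1
  have hg : (PySem.List.slice cs none (some 1) = ">".toList) ↔ (0 < cs.length ∧ cs.getD 0 ' ' = '>') := by
    rw [show ((1:Int)) = ((1:Nat):Int) by norm_num, PySem.List.slice_to_natCast]
    cases cs with
    | nil => simp
    | cons a u => simp [List.take_succ_cons, List.getD]
  have d6 : PySem.List.slice cs (some 6) none = cs.drop 6 := by
    rw [show ((6:Int)) = ((6:Nat):Int) by norm_num]; exact PySem.List.slice_from_natCast cs 6
  have d5 : PySem.List.slice cs (some 5) none = cs.drop 5 := by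
    rw [show ((5:Int)) = ((5:Nat):Int) by norm_num]; exact PySem.List.slice_from_natCast cs 5
  have d4 : PySem.List.slice cs (some 4) none = cs.drop 4 := by
    rw [show ((4:Int)) = ((4:Nat):Int) by norm_num]; exact PySem.List.slice_from_natCast cs 4
  have d3 : PySem.List.slice cs (some 3) none = cs.drop 3 := by
    rw [show ((3:Int)) = ((3:Nat):Int) by norm_num]; exact PySem.List.slice_from_natCast cs 3
  have d2 : PySem.List.slice cs (some 2) none = cs.drop 2 := by
    rw [show ((2:Int)) = ((2:Nat):Int) by norm_num]; exact PySem.List.slice_from_natCast cs 2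
  have d1 : PySem.List.slice cs (some 1) none = cs.drop 1 := by
    rw [show ((1:Int)) = ((1:Nat):Int) by norm_num]; exact PySem.List.slice_from_natCast cs 1
  have hk0 : altHash cs 0 = min 6 t := by
    have := pv_altHash_spec cs 0 (by omega)
    simpa [htd] using this
  unfold pvSymLine altClean
  simp only [h6, h5, h4, h3, h2, h1, hg, d6, d5, d4, d3, d2, d1, hk0]
  by_cases hP : 0 < cs.length ∧ cs.getD 0 ' ' = '>'
  · have h0len : 0 < cs.length := hP.1
    simp only [eq_true hP, and_true]
    split_ifs
    all_goals try (first
        | rfl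
        | omega
        | (rw [pv_trim_eq cs] <;> first | (congr 2 <;> omega) | omega))
    all_goals simp_all
  · simp only [eq_false hP, and_false, if_false]
    split_ifs
    all_goals try (first
        | rfl
        | omega
        | (rw [pv_trim_eq cs] <;> first | (congr 2 <;> omega) | omega))
    all_goals simp_all

-- ===== VERDICT (by name: the statement is the Claim_ definition above) =====
theorem remove_symbols_from_block_spec : Claim_equal_remove_symbols_from_block := by
  intro block _
  unfold Spec_remove_symbols_from_block remove_symbols_from_block remove_symbols_from_block_alt
  simp only [List.append_assoc]
  rw [PySem.List.foldl_append_eq_flatMap (fun line => pvSymLine line ++ ['\n'])]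
  rw [pv_splitOn_eq, pv_altFold]
  simp [pv_line_eq]
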